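-- pv_equiv track=rewrite | github.com/peter-lang/aoc | 2020/6.py | split_lines_by_empty
-- ===== SOURCE A (Python) =====
-- def split_lines_by_empty(lines):
--     result = []
--     for line in lines:
--         if line:
--             result.append(line)
--         elif result:
--             yield result
--             result = []
--     if result:
--         yield result
-- ===== SOURCE B (Python) =====
-- def split_lines_by_empty(lines):
--     # Index-based run finder: locate each maximal run of non-empty lines and
--     # yield it as one slice, instead of growing an accumulator line by line.
--     lines = list(lines)
--     n = len(lines)
--     i = 0
--     while i < n:
--         if lines[i]:
--             j = i
--             while j < n and lines[j]:
--                 j += 1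
--             yield lines[i:j]
--             i = j
--         else:
--             i += 1
-- ===== Notes on version B (the rewrite author's own statement) =====
-- stated objective: alternative
-- what changed: B scans for the end of each maximal run of non-empty lines with an inner index loop and yields that run as a single slice, instead of A's line-by-line accumulator list that is flushed on blank lines and at the end.
import Mathlib
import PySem

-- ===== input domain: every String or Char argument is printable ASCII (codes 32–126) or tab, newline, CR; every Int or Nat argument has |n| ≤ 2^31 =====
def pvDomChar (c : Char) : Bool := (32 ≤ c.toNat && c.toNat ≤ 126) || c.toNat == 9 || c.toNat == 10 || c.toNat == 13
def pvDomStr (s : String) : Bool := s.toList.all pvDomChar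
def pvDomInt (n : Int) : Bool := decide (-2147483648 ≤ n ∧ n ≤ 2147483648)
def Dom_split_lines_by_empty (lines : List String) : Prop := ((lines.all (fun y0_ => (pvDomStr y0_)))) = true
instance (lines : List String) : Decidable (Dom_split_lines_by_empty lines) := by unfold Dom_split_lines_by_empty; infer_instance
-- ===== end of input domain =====

-- B scans for each maximal run of non-empty lines by index and yields it as one slice,
-- instead of A's per-line accumulator flushed on blanks; equivalence of the yielded sequences.


-- ===== PORT A =====
-- the for-loop over lines with state (result, yielded-so-far)
def pvAGo (lines : List String) (result : List String) : List (List String) :=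
  match lines with
  | [] => if result ≠ [] then [result] else []          -- trailing 'if result: yield result'
  | line :: rest =>
    if line ≠ "" then pvAGo rest (result ++ [line])     -- 'if line: result.append(line)'
    else if result ≠ [] then result :: pvAGo rest []    -- 'elif result: yield result; result = []'
    else pvAGo rest result

def split_lines_by_empty (lines : List String) : List (List String) :=
  pvAGo lines []

-- ===== PORT B =====
-- inner while loop: j = i; while j < n and lines[j]: j += 1
def pvRunEnd (lines : List String) (j : Nat) : Nat :=
  if h : j < lines.length then
    if lines[j] ≠ "" then pvRunEnd lines (j + 1) else j
  else j
termination_by lines.length - j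

theorem pvRunEnd_ge (lines : List String) (j : Nat) : j ≤ pvRunEnd lines j := by
  unfold pvRunEnd
  split
  · split
    · exact Nat.le_trans (Nat.le_succ j) (pvRunEnd_ge lines (j + 1))
    · exact Nat.le_refl j
  · exact Nat.le_refl j
termination_by lines.length - j

-- outer while loop over the index i
def pvAltGo (lines : List String) (i : Nat) : List (List String) :=
  if h : i < lines.length then
    if hne : lines[i] ≠ "" then
      let j := pvRunEnd lines i
      PySem.List.slice lines (some (i : Int)) (some (j : Int)) :: pvAltGo lines j
    else pvAltGo lines (i + 1)
  else []
termination_by lines.length - i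
decreasing_by
  · have : i + 1 ≤ pvRunEnd lines i := by
      have := pvRunEnd_ge lines (i + 1)
      unfold pvRunEnd
      simp only [dif_pos h, if_pos hne]
      omega
    omega
  · omega

def split_lines_by_empty_alt (lines : List String) : List (List String) :=
  pvAltGo lines 0

-- ===== PRECONDITION & SPEC =====
def Spec_split_lines_by_empty (lines : List String) (out : List (List String)) : Prop := out = split_lines_by_empty_alt lines
instance (lines : List String) (out : List (List String)) : Decidable (Spec_split_lines_by_empty lines out) := by unfold Spec_split_lines_by_empty; infer_instance

-- ===== CLAIM (what is proved, stated in full; the proofs are below) =====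
def Claim_equal_split_lines_by_empty : Prop := ∀ (lines : List String), Dom_split_lines_by_empty lines → Spec_split_lines_by_empty lines (split_lines_by_empty lines)

-- ===== LEMMAS AND PROOFS =====

theorem pvRunEnd_le (lines : List String) (j : Nat) (hj : j ≤ lines.length) :
    pvRunEnd lines j ≤ lines.length := by
  unfold pvRunEnd
  split
  · split
    · next hlt _ => exact pvRunEnd_le lines (j + 1) hlt
    · omega
  · omega
termination_by lines.length - j

theorem pvRunEnd_step (lines : List String) (i : Nat) (h : i < lines.length)
    (hne : lines[i] ≠ "") : pvRunEnd lines i = pvRunEnd lines (i + 1) := by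
  conv_lhs => unfold pvRunEnd
  simp only [dif_pos h, if_pos hne]

theorem pvRunEnd_stop (lines : List String) (i : Nat)
    (h : ¬ (i < lines.length ∧ lines[i]? ≠ some "")) : pvRunEnd lines i = i := by
  unfold pvRunEnd
  split
  · next hlt =>
    split
    · next hne =>
      exfalso
      apply h
      refine ⟨hlt, ?_⟩
      rw [List.getElem?_eq_getElem hlt]
      simpa using hne
    · rfl
  · rfl

-- the slice lines[i:j] (i ≤ j ≤ n) starting at a valid index i splits off lines[i]
theorem slice_cons (lines : List String) (i j : Nat) (hij : i < j) (hj : j ≤ lines.length) :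
    PySem.List.slice lines (some (i : Int)) (some (j : Int))
      = lines[i]'(by omega) :: PySem.List.slice lines (some ((i + 1 : Nat) : Int)) (some (j : Int)) := by
  rw [PySem.List.slice_natCast, PySem.List.slice_natCast]
  rw [List.drop_eq_getElem_cons (by omega)]
  rw [List.take_succ_cons.symm]
  congr 1
  omega

theorem slice_nil (lines : List String) (i : Nat) :
    PySem.List.slice lines (some (i : Int)) (some ((i : Nat) : Int)) = [] := by
  rw [PySem.List.slice_natCast]; simp

mutual
-- A's loop on the suffix 'lines.drop i', with a nonempty accumulator, yields the
-- accumulator extended by the current run, then continues like B after the run.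
theorem pvAGo_run (lines : List String) (i : Nat) (res : List String) (hres : res ≠ []) :
    pvAGo (lines.drop i) res =
      (res ++ PySem.List.slice lines (some (i : Int)) (some ((pvRunEnd lines i : Nat) : Int)))
        :: pvAltGo lines (pvRunEnd lines i) := by
  by_cases h : i < lines.length
  · rw [List.drop_eq_getElem_cons h]
    by_cases hne : lines[i] ≠ ""
    · rw [pvAGo]
      simp only [if_pos hne]
      rw [pvAGo_run lines (i + 1) (res ++ [lines[i]]) (by simp)]
      rw [pvRunEnd_step lines i h hne]
      have h1 : i + 1 ≤ pvRunEnd lines (i + 1) := pvRunEnd_ge lines (i + 1)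
      have h2 : pvRunEnd lines (i + 1) ≤ lines.length := pvRunEnd_le lines (i + 1) (by omega)
      rw [slice_cons lines i (pvRunEnd lines (i + 1)) (by omega) h2]
      simp
    · push Not at hne
      rw [pvAGo]
      simp only [hne, ne_eq, not_true_eq_false, if_neg, if_pos hres, not_false_eq_true]
      have hstop : pvRunEnd lines i = i := by
        apply pvRunEnd_stop
        intro ⟨_, hc⟩
        rw [List.getElem?_eq_getElem h, hne] at hc
        exact hc rfl
      rw [hstop, slice_nil]
      have : pvAltGo lines i = pvAltGo lines (i + 1) := by
        rw [pvAltGo]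
        simp [h, hne]
      rw [this, pvAGo_main lines (i + 1)]
      simp
  · rw [List.drop_eq_nil_of_le (by omega)]
    rw [pvAGo]
    have hstop : pvRunEnd lines i = i := pvRunEnd_stop lines i (by
      intro ⟨hc, _⟩; omega)
    rw [hstop, slice_nil]
    have : pvAltGo lines i = [] := by rw [pvAltGo]; simp [h]
    simp [this, hres]
termination_by lines.length - i

-- A's loop on the suffix 'lines.drop i' with empty accumulator equals B's loop from index i.
theorem pvAGo_main (lines : List String) (i : Nat) :
    pvAGo (lines.drop i) [] = pvAltGo lines i := by
  by_cases h : i < lines.length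
  · rw [List.drop_eq_getElem_cons h]
    by_cases hne : lines[i] ≠ ""
    · rw [pvAGo]
      simp only [if_pos hne, List.nil_append]
      rw [pvAGo_run lines (i + 1) [lines[i]] (by simp)]
      conv_rhs => rw [pvAltGo]
      simp only [dif_pos h, dif_pos hne]
      rw [pvRunEnd_step lines i h hne]
      have h1 : i + 1 ≤ pvRunEnd lines (i + 1) := pvRunEnd_ge lines (i + 1)
      have h2 : pvRunEnd lines (i + 1) ≤ lines.length := pvRunEnd_le lines (i + 1) (by omega)
      rw [slice_cons lines i (pvRunEnd lines (i + 1)) (by omega) h2]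
      simp
    · push Not at hne
      rw [pvAGo]
      simp only [hne, ne_eq, not_true_eq_false, if_neg, not_false_eq_true]
      rw [pvAGo_main lines (i + 1)]
      conv_rhs => rw [pvAltGo]
      simp [h, hne]
  · rw [List.drop_eq_nil_of_le (by omega)]
    rw [pvAGo, pvAltGo]
    simp [h]
termination_by lines.length - i

end

-- ===== VERDICT (by name: the statement is the Claim_ definition above) =====
theorem split_lines_by_empty_spec : Claim_equal_split_lines_by_empty := by
  intro lines _
  unfold Spec_split_lines_by_empty split_lines_by_empty split_lines_by_empty_alt
  have := pvAGo_main lines 0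
  simpa using this
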